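-- pv_equiv track=rewrite | github.com/ClaudiaHdezPerez/GPTur | src/agents/gastronomy_agent.py | _classify_restaurants
-- ===== SOURCE A (Python) =====
-- def _classify_restaurants(results):
--     """
--     Classifies restaurants by cuisine type from search results.
--
--     Args:
--         results (list): List of restaurant search results
--
--     Returns:
--         dict: Restaurants classified by cuisine type
--     """
--     classified = {
--         "cuban": [],
--         "seafood": [],
--         "international": [],
--         "creole": [],
--         "italian": [],
--         "fusion": []
--     }
--
--     for result in results:
--         result_lower = result.lower()
--         if "cuba" in result_lower or "criolla" in result_lower:
--             classified["cuban"].append(result)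
--         elif "mar" in result_lower or "seafood" in result_lower or "pescado" in result_lower:
--             classified["seafood"].append(result)
--         elif "international" in result_lower or "internacional" in result_lower:
--             classified["international"].append(result)
--         elif "creole" in result_lower or "criolla" in result_lower:
--             classified["creole"].append(result)
--         elif "italian" in result_lower or "italiana" in result_lower:
--             classified["italian"].append(result)
--         else:
--             classified["fusion"].append(result)
--
--     return classified
-- ===== SOURCE B (Python) =====
-- _TABLE = [
--     ("cuban", ("cuba", "criolla")),
--     ("seafood", ("mar", "seafood", "pescado")),
--     ("international", ("international", "internacional")),
--     ("creole", ("creole", "criolla")),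
--     ("italian", ("italian", "italiana")),
-- ]
--
--
-- def _category(result):
--     result_lower = result.lower()
--     for category, keywords in _TABLE:
--         if any(k in result_lower for k in keywords):
--             return category
--     return "fusion"
--
--
-- def _classify_restaurants(results):
--     categories = [c for c, _ in _TABLE] + ["fusion"]
--     return {c: [r for r in results if _category(r) == c] for c in categories}
-- ===== Notes on version B (the rewrite author's own statement) =====
-- stated objective: idiomatic
-- what changed: Replaces the six-way if-elif chain mutating a dict in one pass by an ordered (category, keywords) table with a first-match lookup, and builds the result as a per-category filter comprehension instead of appending into pre-initialized lists.
import Mathlib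
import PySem

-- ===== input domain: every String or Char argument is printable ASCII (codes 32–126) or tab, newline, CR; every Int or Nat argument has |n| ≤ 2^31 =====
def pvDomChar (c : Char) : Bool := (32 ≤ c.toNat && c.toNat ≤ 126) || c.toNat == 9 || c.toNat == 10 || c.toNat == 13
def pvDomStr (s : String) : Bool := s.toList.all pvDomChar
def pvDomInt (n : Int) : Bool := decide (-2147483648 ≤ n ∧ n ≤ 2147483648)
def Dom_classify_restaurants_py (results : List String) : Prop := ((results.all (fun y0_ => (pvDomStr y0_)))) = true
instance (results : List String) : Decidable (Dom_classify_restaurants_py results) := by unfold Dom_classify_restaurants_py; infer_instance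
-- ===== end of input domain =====

-- B replaces A's six-way if-elif chain mutating a dict by an ordered (category, keywords)
-- table with first-match lookup and a per-category filter comprehension (idiomatic; same cost).


-- ===== PORT A =====
-- the body of A's for-loop, named so the fold is readable
def pvStepA (classified : PySem.Dict String (List String)) (result : String) :
    PySem.Dict String (List String) :=
  let rl := PySem.Str.lower result
  if PySem.Str.isIn "cuba" rl || PySem.Str.isIn "criolla" rl then
    classified.modify "cuban" [] (fun l => l ++ [result])
  else if PySem.Str.isIn "mar" rl || PySem.Str.isIn "seafood" rl || PySem.Str.isIn "pescado" rl then
    classified.modify "seafood" [] (fun l => l ++ [result])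
  else if PySem.Str.isIn "international" rl || PySem.Str.isIn "internacional" rl then
    classified.modify "international" [] (fun l => l ++ [result])
  else if PySem.Str.isIn "creole" rl || PySem.Str.isIn "criolla" rl then
    classified.modify "creole" [] (fun l => l ++ [result])
  else if PySem.Str.isIn "italian" rl || PySem.Str.isIn "italiana" rl then
    classified.modify "italian" [] (fun l => l ++ [result])
  else
    classified.modify "fusion" [] (fun l => l ++ [result])

def classify_restaurants_py (results : List String) : List (String × List String) :=
  (results.foldl pvStepA
    (PySem.Dict.mk [("cuban", []), ("seafood", []), ("international", []),
                    ("creole", []), ("italian", []), ("fusion", [])])).items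

-- ===== PORT B =====
def pvTable : List (String × List String) :=
  [("cuban", ["cuba", "criolla"]),
   ("seafood", ["mar", "seafood", "pescado"]),
   ("international", ["international", "internacional"]),
   ("creole", ["creole", "criolla"]),
   ("italian", ["italian", "italiana"])]

-- Source B's `for category, keywords in _TABLE: … return category` / `return "fusion"` loop
def pvCatGo (rl : String) : List (String × List String) → String
  | [] => "fusion"
  | (category, keywords) :: rest =>
      if keywords.any (fun k => PySem.Str.isIn k rl) then category else pvCatGo rl rest

def pvCategory (result : String) : String :=
  pvCatGo (PySem.Str.lower result) pvTable

def classify_restaurants_py_alt (results : List String) : List (String × List String) :=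
  (pvTable.map Prod.fst ++ ["fusion"]).map
    (fun c => (c, results.filter (fun r => pvCategory r == c)))

-- ===== PRECONDITION & SPEC =====
def Spec_classify_restaurants_py (results : List String) (out : List (String × List String)) : Prop := out = classify_restaurants_py_alt results
instance (results : List String) (out : List (String × List String)) : Decidable (Spec_classify_restaurants_py results out) := by unfold Spec_classify_restaurants_py; infer_instance

-- ===== CLAIM (what is proved, stated in full; the proofs are below) =====
def Claim_equal_classify_restaurants_py : Prop := ∀ (results : List String), Dom_classify_restaurants_py results → Spec_classify_restaurants_py results (classify_restaurants_py results)

-- ===== LEMMAS AND PROOFS =====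

-- A's fold over the literal six-key dict appends, per key, exactly the results B's
-- first-match classifier assigns to that key.
theorem pvLoopA (results : List String) (v1 v2 v3 v4 v5 v6 : List String) :
    results.foldl pvStepA
      (PySem.Dict.mk [("cuban", v1), ("seafood", v2), ("international", v3),
                      ("creole", v4), ("italian", v5), ("fusion", v6)]) =
    PySem.Dict.mk
      [("cuban", v1 ++ results.filter (fun r => pvCategory r == "cuban")),
       ("seafood", v2 ++ results.filter (fun r => pvCategory r == "seafood")),
       ("international", v3 ++ results.filter (fun r => pvCategory r == "international")),
       ("creole", v4 ++ results.filter (fun r => pvCategory r == "creole")),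
       ("italian", v5 ++ results.filter (fun r => pvCategory r == "italian")),
       ("fusion", v6 ++ results.filter (fun r => pvCategory r == "fusion"))] := by
  induction results generalizing v1 v2 v3 v4 v5 v6 with
  | nil => simp
  | cons r t ih =>
    rw [List.foldl_cons]
    by_cases h1 : PySem.Str.isIn "cuba" (PySem.Str.lower r) = true
    · simp at h1
      simp [pvStepA, PySem.Dict.modify, PySem.Dict.insert, PySem.Dict.getD, PySem.Dict.get?, PySem.Dict.contains, pvCategory, pvCatGo, pvTable, ih, h1]
    · simp at h1
      by_cases h2 : PySem.Str.isIn "criolla" (PySem.Str.lower r) = true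
      · simp at h2
        simp [pvStepA, PySem.Dict.modify, PySem.Dict.insert, PySem.Dict.getD, PySem.Dict.get?, PySem.Dict.contains, pvCategory, pvCatGo, pvTable, ih, h1, h2]
      · simp at h2
        by_cases h3 : PySem.Str.isIn "mar" (PySem.Str.lower r) = true
        · simp at h3
          simp [pvStepA, PySem.Dict.modify, PySem.Dict.insert, PySem.Dict.getD, PySem.Dict.get?, PySem.Dict.contains, pvCategory, pvCatGo, pvTable, ih, h1, h2, h3]
        · simp at h3
          by_cases h4 : PySem.Str.isIn "seafood" (PySem.Str.lower r) = true
          · simp at h4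
            simp [pvStepA, PySem.Dict.modify, PySem.Dict.insert, PySem.Dict.getD, PySem.Dict.get?, PySem.Dict.contains, pvCategory, pvCatGo, pvTable, ih, h1, h2, h3, h4]
          · simp at h4
            by_cases h5 : PySem.Str.isIn "pescado" (PySem.Str.lower r) = true
            · simp at h5
              simp [pvStepA, PySem.Dict.modify, PySem.Dict.insert, PySem.Dict.getD, PySem.Dict.get?, PySem.Dict.contains, pvCategory, pvCatGo, pvTable, ih, h1, h2, h3, h4, h5]
            · simp at h5
              by_cases h6 : PySem.Str.isIn "international" (PySem.Str.lower r) = true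
              · simp at h6
                simp [pvStepA, PySem.Dict.modify, PySem.Dict.insert, PySem.Dict.getD, PySem.Dict.get?, PySem.Dict.contains, pvCategory, pvCatGo, pvTable, ih, h1, h2, h3, h4, h5, h6]
              · simp at h6
                by_cases h7 : PySem.Str.isIn "internacional" (PySem.Str.lower r) = true
                · simp at h7
                  simp [pvStepA, PySem.Dict.modify, PySem.Dict.insert, PySem.Dict.getD, PySem.Dict.get?, PySem.Dict.contains, pvCategory, pvCatGo, pvTable, ih, h1, h2, h3, h4, h5, h6, h7]
                · simp at h7
                  by_cases h8 : PySem.Str.isIn "creole" (PySem.Str.lower r) = true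
                  · simp at h8
                    simp [pvStepA, PySem.Dict.modify, PySem.Dict.insert, PySem.Dict.getD, PySem.Dict.get?, PySem.Dict.contains, pvCategory, pvCatGo, pvTable, ih, h1, h2, h3, h4, h5, h6, h7, h8]
                  · simp at h8
                    by_cases h9 : PySem.Str.isIn "italian" (PySem.Str.lower r) = true
                    · simp at h9
                      simp [pvStepA, PySem.Dict.modify, PySem.Dict.insert, PySem.Dict.getD, PySem.Dict.get?, PySem.Dict.contains, pvCategory, pvCatGo, pvTable, ih, h1, h2, h3, h4, h5, h6, h7, h8, h9]
                    · simp at h9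
                      by_cases h10 : PySem.Str.isIn "italiana" (PySem.Str.lower r) = true
                      · simp at h10
                        simp [pvStepA, PySem.Dict.modify, PySem.Dict.insert, PySem.Dict.getD, PySem.Dict.get?, PySem.Dict.contains, pvCategory, pvCatGo, pvTable, ih, h1, h2, h3, h4, h5, h6, h7, h8, h9, h10]
                      · simp at h10
                        simp [pvStepA, PySem.Dict.modify, PySem.Dict.insert, PySem.Dict.getD, PySem.Dict.get?, PySem.Dict.contains, pvCategory, pvCatGo, pvTable, ih, h1, h2, h3, h4, h5, h6, h7, h8, h9, h10]

-- ===== VERDICT (by name: the statement is the Claim_ definition above) =====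
theorem classify_restaurants_py_spec : Claim_equal_classify_restaurants_py := by
  intro results _
  unfold Spec_classify_restaurants_py
  unfold classify_restaurants_py classify_restaurants_py_alt
  rw [pvLoopA]
  simp [pvTable]
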